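-- pv_equiv track=rewrite | github.com/pypi-data/pypi-mirror-369 | packages/mysql-compare/mysql_compare-0.7.14.post11-py3-none-any.whl/mysql_compare/mysql_compare_forward.py | get_query_full_table_statement_params
-- ===== SOURCE A (Python) =====
-- def get_query_full_table_statement_params(
--     database: str,
--     table: str,
--     table_keys,
--     limit_size: int,
--     ckpt_row: dict = None,
-- ):
--     _keyval = ckpt_row
--     # select * from where 1 = 1 and ((a > xxx) or (a = xxx and b > yyy) or (a = xxx and b = yyy and c > zzz)) order by a,b,c limit checksize
--     _key_colns = ", ".join([f"`{col[0]}`" for col in table_keys])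
--
--     for _, column_type in table_keys:
--         if column_type in ["int", "double", "char", "date", "decimal", "varchar", "bigint", "tinyint", "smallint"]:
--             pass
--         else:
--             raise ValueError(f"Data type: [{column_type}] is not supported yet.")
--
--     where_conditions = []
--     for end_idx in range(len(table_keys)):
--         condition_parts = []
--         for i, (column_name, _) in enumerate(table_keys[: end_idx + 1]):
--             operator = ">" if i == end_idx else "="
--             condition_parts.append(f"`{column_name}` {operator} %s")
--         where_conditions.append(" and ".join(condition_parts))
--     where_clause = "WHERE " + "(" + ") or (".join(where_conditions) + ")"
--
--     statement_with_condition = f"SELECT * FROM `{database}`.`{table}` {where_clause} ORDER BY {_key_colns} LIMIT {limit_size}"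
--     statement_without_condition = f"SELECT * FROM `{database}`.`{table}` ORDER BY {_key_colns} LIMIT {limit_size}"
--
--     _params: list = []
--     if _keyval:
--         for end_idx in range(len(table_keys)):
--             for i, (column_name, _) in enumerate(table_keys[: end_idx + 1]):
--                 _params.append(_keyval[column_name])
--
--     statement = statement_with_condition if _params else statement_without_condition
--
--     return statement, _params
-- ===== SOURCE B (Python) =====
-- def get_query_full_table_statement_params(
--     database: str,
--     table: str,
--     table_keys,
--     limit_size: int,
--     ckpt_row: dict = None,
-- ):
--     for _, column_type in table_keys:
--         if column_type not in ("int", "double", "char", "date", "decimal", "varchar", "bigint", "tinyint", "smallint"):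
--             raise ValueError(f"Data type: [{column_type}] is not supported yet.")
--
--     cols = ", ".join(f"`{c}`" for c, _ in table_keys)
--
--     # single pass: eq holds the equality clauses of the columns seen so far,
--     # prefix holds their checkpoint values; each step emits one OR-branch and
--     # one triangular params segment.
--     where_conditions = []
--     params = []
--     eq = []
--     prefix = []
--     for col, _ in table_keys:
--         where_conditions.append(" and ".join(eq + [f"`{col}` > %s"]))
--         eq.append(f"`{col}` = %s")
--         if ckpt_row:
--             prefix.append(ckpt_row[col])
--             params.extend(prefix)
--
--     head = f"SELECT * FROM `{database}`.`{table}`"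
--     tail = f" ORDER BY {cols} LIMIT {limit_size}"
--     if params:
--         statement = head + " WHERE (" + ") or (".join(where_conditions) + ")" + tail
--     else:
--         statement = head + tail
--     return statement, params
-- ===== Notes on version B (the rewrite author's own statement) =====
-- stated objective: simpler
-- what changed: B builds the keyset WHERE branches and the triangular params in one pass with running accumulators (eq clauses / checkpoint-value prefix) instead of A's re-slicing table_keys[:end_idx+1] inside two separate range loops.
import Mathlib
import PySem

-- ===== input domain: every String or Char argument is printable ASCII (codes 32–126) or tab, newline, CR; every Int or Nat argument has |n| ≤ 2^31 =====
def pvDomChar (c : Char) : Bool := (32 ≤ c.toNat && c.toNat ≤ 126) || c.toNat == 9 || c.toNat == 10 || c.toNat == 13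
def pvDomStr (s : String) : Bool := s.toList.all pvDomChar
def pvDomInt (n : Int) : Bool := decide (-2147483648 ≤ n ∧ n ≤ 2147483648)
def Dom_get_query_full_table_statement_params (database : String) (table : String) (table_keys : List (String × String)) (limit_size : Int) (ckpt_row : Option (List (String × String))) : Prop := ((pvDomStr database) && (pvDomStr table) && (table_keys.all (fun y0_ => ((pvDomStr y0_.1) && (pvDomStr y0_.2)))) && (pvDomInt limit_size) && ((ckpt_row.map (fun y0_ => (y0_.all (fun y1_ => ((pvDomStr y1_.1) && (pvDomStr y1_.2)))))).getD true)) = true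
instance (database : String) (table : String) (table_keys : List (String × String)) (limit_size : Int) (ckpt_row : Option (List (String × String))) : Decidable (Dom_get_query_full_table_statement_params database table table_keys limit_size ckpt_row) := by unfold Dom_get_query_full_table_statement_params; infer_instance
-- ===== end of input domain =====

-- B builds the keyset WHERE branches and the triangular params in ONE pass with running
-- accumulators instead of A's two range-loops that re-slice table_keys[:end_idx+1]; objective: simpler.
-- Return-value equivalence only; neither function mutates its arguments.

-- ===== PORT A =====
-- A's type-validation loop only raises (ValueError) or does nothing; inputs where it raises,
-- and inputs where `_keyval[column_name]` raises KeyError, are excluded by Pre_ below.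
def get_query_full_table_statement_params (database : String) (table : String) (table_keys : List (String × String)) (limit_size : Int) (ckpt_row : Option (List (String × String))) : String × List String :=
  let _key_colns := PySem.Str.join ", " (table_keys.map (fun col => "`" ++ col.1 ++ "`"))
  let where_conditions := (PySem.List.pyRange 0 (table_keys.length : Int)).foldl
    (fun acc end_idx =>
      acc ++ [PySem.Str.join " and "
        ((PySem.List.enumerate (PySem.List.slice table_keys none (some (end_idx + 1)))).map
          (fun p => "`" ++ p.2.1 ++ "` " ++ (if p.1 = end_idx then ">" else "=") ++ " %s"))]) []
  let where_clause := "WHERE " ++ "(" ++ PySem.Str.join ") or (" where_conditions ++ ")"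
  let statement_with_condition := "SELECT * FROM `" ++ database ++ "`.`" ++ table ++ "` " ++ where_clause ++ " ORDER BY " ++ _key_colns ++ " LIMIT " ++ PySem.Int.toStr limit_size
  let statement_without_condition := "SELECT * FROM `" ++ database ++ "`.`" ++ table ++ "` ORDER BY " ++ _key_colns ++ " LIMIT " ++ PySem.Int.toStr limit_size
  let _params : List String :=
    match ckpt_row with
    | none => []
    | some kv =>
      if kv.isEmpty then []
      else (PySem.List.pyRange 0 (table_keys.length : Int)).foldl
        (fun acc end_idx =>
          acc ++ (PySem.List.slice table_keys none (some (end_idx + 1))).map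
            (fun c => (PySem.Dict.mk kv).getD c.1 "")) []
  let statement := if _params.isEmpty then statement_without_condition else statement_with_condition
  (statement, _params)

-- ===== PORT B =====
-- loop body of Source B's single pass (state: where_conditions, params, eq, prefix)
def pvStepB (ckpt_row : Option (List (String × String)))
    (st : List String × List String × List String × List String)
    (col : String × String) : List String × List String × List String × List String :=
  let wcs := st.1 ++ [PySem.Str.join " and " (st.2.2.1 ++ ["`" ++ col.1 ++ "` > %s"])]
  let eqs := st.2.2.1 ++ ["`" ++ col.1 ++ "` = %s"]
  match ckpt_row with
  | some kv =>
    if kv.isEmpty then (wcs, st.2.1, eqs, st.2.2.2)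
    else
      let pre := st.2.2.2 ++ [(PySem.Dict.mk kv).getD col.1 ""]
      (wcs, st.2.1 ++ pre, eqs, pre)
  | none => (wcs, st.2.1, eqs, st.2.2.2)

def get_query_full_table_statement_params_alt (database : String) (table : String) (table_keys : List (String × String)) (limit_size : Int) (ckpt_row : Option (List (String × String))) : String × List String :=
  let cols := PySem.Str.join ", " (table_keys.map (fun c => "`" ++ c.1 ++ "`"))
  let final := table_keys.foldl (pvStepB ckpt_row) ([], [], [], [])
  let head := "SELECT * FROM `" ++ database ++ "`.`" ++ table ++ "`"
  let tail := " ORDER BY " ++ cols ++ " LIMIT " ++ PySem.Int.toStr limit_size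
  let statement :=
    if final.2.1.isEmpty then head ++ tail
    else head ++ " WHERE (" ++ PySem.Str.join ") or (" final.1 ++ ")" ++ tail
  (statement, final.2.1)

-- ===== PRECONDITION & SPEC =====
-- Pre_ = exactly the inputs where Python A returns: every column type is in the supported list
-- (else ValueError) and, when ckpt_row is truthy, every key column is a key of it (else KeyError).
def Pre_get_query_full_table_statement_params (database : String) (table : String) (table_keys : List (String × String)) (limit_size : Int) (ckpt_row : Option (List (String × String))) : Prop :=
  (∀ p ∈ table_keys, p.2 ∈ (["int", "double", "char", "date", "decimal", "varchar", "bigint", "tinyint", "smallint"] : List String)) ∧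
  ((ckpt_row.getD []).isEmpty = false →
    ∀ p ∈ table_keys, ((PySem.Dict.mk (ckpt_row.getD [])).get? p.1).isSome = true)
instance (database : String) (table : String) (table_keys : List (String × String)) (limit_size : Int) (ckpt_row : Option (List (String × String))) : Decidable (Pre_get_query_full_table_statement_params database table table_keys limit_size ckpt_row) := by unfold Pre_get_query_full_table_statement_params; infer_instance

def pvWitness_get_query_full_table_statement_params : String × String × (List (String × String)) × Int × (Option (List (String × String))) :=
  ("db", "t", [("a", "int"), ("b", "varchar")], 10, some [("a", "1"), ("b", "2")])

def Spec_get_query_full_table_statement_params (database : String) (table : String) (table_keys : List (String × String)) (limit_size : Int) (ckpt_row : Option (List (String × String))) (out : String × List String) : Prop := out = get_query_full_table_statement_params_alt database table table_keys limit_size ckpt_row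
instance (database : String) (table : String) (table_keys : List (String × String)) (limit_size : Int) (ckpt_row : Option (List (String × String))) (out : String × List String) : Decidable (Spec_get_query_full_table_statement_params database table table_keys limit_size ckpt_row out) := by unfold Spec_get_query_full_table_statement_params; infer_instance

-- ===== CLAIM (what is proved, stated in full; the proofs are below) =====
def Claim_equal_get_query_full_table_statement_params : Prop := ∀ (database : String) (table : String) (table_keys : List (String × String)) (limit_size : Int) (ckpt_row : Option (List (String × String))), Dom_get_query_full_table_statement_params database table table_keys limit_size ckpt_row → Pre_get_query_full_table_statement_params database table table_keys limit_size ckpt_row → Spec_get_query_full_table_statement_params database table table_keys limit_size ckpt_row (get_query_full_table_statement_params database table table_keys limit_size ckpt_row)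

-- ===== LEMMAS AND PROOFS =====

def pvEqC (c : String × String) : String := "`" ++ c.1 ++ "` = %s"
def pvGtC (c : String × String) : String := "`" ++ c.1 ++ "` > %s"

-- the list of OR-branches produced after the equality clauses `eqs` have accumulated
def pvCondsAux (eqs : List String) : List (String × String) → List String
  | [] => []
  | c :: rest => PySem.Str.join " and " (eqs ++ [pvGtC c]) :: pvCondsAux (eqs ++ [pvEqC c]) rest

-- the triangular parameter list produced after the value prefix `pre` has accumulated
def pvParamsAux (v : String × String → String) (pre : List String) : List (String × String) → List String
  | [] => []
  | c :: rest => (pre ++ [v c]) ++ pvParamsAux v (pre ++ [v c]) rest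

lemma pvLit_merge (a b c s : String) (h : a ++ b = c) : a ++ (b ++ s) = c ++ s := by
  rw [← String.append_assoc, h]

lemma pvA_conds (l : List (String × String)) (eqs : List String) :
    (List.range l.length).map
      (fun k => PySem.Str.join " and " (eqs ++ (l.take k).map pvEqC ++ [pvGtC (l.getD k ("", ""))]))
      = pvCondsAux eqs l := by
  induction l generalizing eqs with
  | nil => simp [pvCondsAux]
  | cons c rest ih =>
    simp only [List.length_cons, List.range_succ_eq_map, List.map_cons, List.map_map]
    simp only [pvCondsAux, List.take_zero, List.map_nil, List.getD_cons_zero, List.append_nil]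
    refine congrArg₂ _ rfl ?_
    rw [← ih (eqs ++ [pvEqC c])]
    apply List.map_congr_left
    intro k _
    simp [List.append_assoc]

lemma pvA_params (v : String × String → String) (l : List (String × String)) (pre : List String) :
    (List.range l.length).flatMap (fun k => pre ++ (l.take (k + 1)).map v) = pvParamsAux v pre l := by
  induction l generalizing pre with
  | nil => simp [pvParamsAux]
  | cons c rest ih =>
    simp only [List.length_cons, List.range_succ_eq_map, List.flatMap_cons, List.flatMap_map]
    simp only [pvParamsAux, List.take_succ_cons, List.take_zero, List.map_nil, List.map_cons]
    rw [← ih (pre ++ [v c])]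
    refine congrArg₂ _ (by simp) ?_
    apply List.flatMap_congr
    intro k _
    simp [List.append_assoc]

lemma pvEnum_eq_part (ys : List (String × String)) (s k : Int) (h : s + ys.length ≤ k) :
    (PySem.List.enumerate ys s).map
        (fun p => "`" ++ p.2.1 ++ "` " ++ (if p.1 = k then ">" else "=") ++ " %s")
      = ys.map pvEqC := by
  induction ys generalizing s with
  | nil => simp [PySem.List.enumerate_nil]
  | cons c rest ih =>
    rw [PySem.List.enumerate_cons]
    simp only [List.map_cons]
    have hs : s ≠ k := by simp only [List.length_cons] at h; omega
    rw [ih (s + 1) (by simp only [List.length_cons] at h ⊢; push_cast at h ⊢; omega)]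
    simp [hs, pvEqC, String.append_assoc]

lemma pvEnum_cond (l : List (String × String)) (k : Nat) (hk : k < l.length) :
    (PySem.List.enumerate (l.take (k + 1))).map
        (fun p => "`" ++ p.2.1 ++ "` " ++ (if p.1 = (k : Int) then ">" else "=") ++ " %s")
      = (l.take k).map pvEqC ++ [pvGtC (l.getD k ("", ""))] := by
  have htake : l.take (k + 1) = l.take k ++ [l.getD k ("", "")] := by
    rw [List.take_add_one, List.getElem?_eq_getElem hk]
    simp [List.getD_eq_getElem?_getD, List.getElem?_eq_getElem hk]
  rw [htake]
  have hlen : (l.take k).length = k := by simp [Nat.min_eq_left (Nat.le_of_lt hk)]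
  rw [PySem.List.enumerate_append, List.map_append, hlen]
  rw [pvEnum_eq_part (l.take k) 0 (k : Int) (by rw [hlen]; omega)]
  rw [PySem.List.enumerate_cons, PySem.List.enumerate_nil]
  simp [pvGtC, String.append_assoc]

-- B's fold, truthy checkpoint
lemma pvB_fold_truthy (kv : List (String × String)) (hkv : kv.isEmpty = false)
    (l : List (String × String)) (wcs ps eqs pre : List String) :
    l.foldl (pvStepB (some kv)) (wcs, ps, eqs, pre)
      = (wcs ++ pvCondsAux eqs l,
         ps ++ pvParamsAux (fun c => (PySem.Dict.mk kv).getD c.1 "") pre l,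
         eqs ++ l.map pvEqC,
         pre ++ l.map (fun c => (PySem.Dict.mk kv).getD c.1 "")) := by
  induction l generalizing wcs ps eqs pre with
  | nil => simp [pvCondsAux, pvParamsAux]
  | cons c rest ih =>
    simp only [List.foldl_cons, pvStepB, hkv, Bool.false_eq_true, if_false]
    rw [ih]
    simp [pvCondsAux, pvParamsAux, pvEqC, pvGtC, List.append_assoc]

-- B's fold, falsy checkpoint (`none`, or an empty dict)
lemma pvB_fold_falsy (ckpt_row : Option (List (String × String)))
    (hck : (ckpt_row.getD []).isEmpty = true)
    (l : List (String × String)) (wcs ps eqs pre : List String) :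
    l.foldl (pvStepB ckpt_row) (wcs, ps, eqs, pre)
      = (wcs ++ pvCondsAux eqs l, ps, eqs ++ l.map pvEqC, pre) := by
  induction l generalizing wcs eqs with
  | nil => simp [pvCondsAux]
  | cons c rest ih =>
    cases ckpt_row with
    | none =>
      simp only [List.foldl_cons, pvStepB]
      rw [ih]
      simp [pvCondsAux, pvEqC, pvGtC, List.append_assoc]
    | some kv =>
      simp only [Option.getD_some] at hck
      simp only [List.foldl_cons, pvStepB, hck, if_true]
      rw [ih]
      simp [pvCondsAux, pvEqC, pvGtC, List.append_assoc]

-- A's where_conditions equal the accumulator form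
lemma pvA_where (l : List (String × String)) :
    (PySem.List.pyRange 0 (l.length : Int)).foldl
      (fun acc end_idx =>
        acc ++ [PySem.Str.join " and "
          ((PySem.List.enumerate (PySem.List.slice l none (some (end_idx + 1)))).map
            (fun p => "`" ++ p.2.1 ++ "` " ++ (if p.1 = end_idx then ">" else "=") ++ " %s"))]) []
      = pvCondsAux [] l := by
  rw [PySem.List.foldl_append_singleton_eq_map, PySem.List.pyRange_zero_natCast, List.map_map]
  rw [← pvA_conds l []]
  apply List.map_congr_left
  intro k hk
  rw [List.mem_range] at hk
  have : ((k : Int) + 1) = ((k + 1 : Nat) : Int) := by push_cast; ring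
  simp only [Function.comp_apply, List.nil_append, this, PySem.List.slice_to_natCast]
  rw [pvEnum_cond l k hk]

-- A's params equal the accumulator form
lemma pvA_pars (kv : List (String × String)) (l : List (String × String)) :
    (PySem.List.pyRange 0 (l.length : Int)).foldl
      (fun acc end_idx =>
        acc ++ (PySem.List.slice l none (some (end_idx + 1))).map
          (fun c => (PySem.Dict.mk kv).getD c.1 "")) []
      = pvParamsAux (fun c => (PySem.Dict.mk kv).getD c.1 "") [] l := by
  rw [PySem.List.foldl_append_eq_flatMap, PySem.List.pyRange_zero_natCast, List.flatMap_map]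
  rw [← pvA_params (fun c => (PySem.Dict.mk kv).getD c.1 "") l []]
  apply List.flatMap_congr
  intro k _
  have : ((k : Int) + 1) = ((k + 1 : Nat) : Int) := by push_cast; ring
  simp only [this, PySem.List.slice_to_natCast, List.nil_append]

-- ===== VERDICT (by name: the statement is the Claim_ definition above) =====
theorem get_query_full_table_statement_params_spec : Claim_equal_get_query_full_table_statement_params := by
  intro database table table_keys limit_size ckpt_row _ _
  unfold Spec_get_query_full_table_statement_params
  unfold get_query_full_table_statement_params get_query_full_table_statement_params_alt
  by_cases hck : (ckpt_row.getD []).isEmpty = true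
  · -- falsy checkpoint: params are [] on both sides
    rw [pvB_fold_falsy ckpt_row hck]
    have hp : (match ckpt_row with
        | none => ([] : List String)
        | some kv =>
          if kv.isEmpty then []
          else (PySem.List.pyRange 0 (table_keys.length : Int)).foldl
            (fun acc end_idx =>
              acc ++ (PySem.List.slice table_keys none (some (end_idx + 1))).map
                (fun c => (PySem.Dict.mk kv).getD c.1 "")) []) = [] := by
      cases ckpt_row with
      | none => rfl
      | some kv => simp only [Option.getD_some] at hck; simp [hck]
    rw [hp]
    simp [String.append_assoc]
    exact (pvLit_merge _ _ _ _ (by simp)).symm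
  · -- truthy checkpoint
    rw [Bool.not_eq_true] at hck
    obtain ⟨kv, rfl⟩ : ∃ kv, ckpt_row = some kv := by
      cases ckpt_row with
      | none => simp at hck
      | some kv => exact ⟨kv, rfl⟩
    simp only [Option.getD_some] at hck
    rw [pvB_fold_truthy kv hck]
    simp only [hck, Bool.false_eq_true, if_false]
    rw [pvA_where, pvA_pars, List.nil_append, List.nil_append]
    by_cases hemp : (pvParamsAux (fun c => (PySem.Dict.mk kv).getD c.1 "") [] table_keys).isEmpty = true
    · rw [if_pos hemp, if_pos hemp]
      simp [String.append_assoc]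
      exact (pvLit_merge _ _ _ _ (by simp)).symm
    · rw [if_neg hemp, if_neg hemp]
      simp [String.append_assoc]
      have hW : ∀ s : String, ("` " : String) ++ ("WHERE (" ++ s) = "` WHERE (" ++ s :=
        fun s => pvLit_merge _ _ _ s (by simp)
      have hP : ∀ s : String, (")" : String) ++ (" ORDER BY " ++ s) = ") ORDER BY " ++ s :=
        fun s => pvLit_merge _ _ _ s (by simp)
      rw [hW, hP]
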